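-- pv_equiv track=rewrite | github.com/PLeVasseur/opencode-project-agents | fls/glossary-term-map.py | split_options
-- ===== SOURCE A (Python) =====
-- def split_options(block_lines: list[str]) -> tuple[dict[str, object], list[str]]:
--     options: dict[str, object] = {}
--     content: list[str] = []
--     in_options = True
--
--     for line in block_lines:
--         if in_options:
--             if line.strip() == "":
--                 in_options = False
--                 continue
--
--             if line.startswith(":") and ":" in line[1:]:
--                 name, value = parse_option_line(line)
--                 options[name] = value
--                 continue
--
--             in_options = False
--
--         content.append(line)
--
--     return options, content
--
-- def parse_option_line(line: str) -> tuple[str, str]: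
--     parts = line.split(":", 2)
--     name = parts[1].strip() if len(parts) > 1 else ""
--     value = parts[2].strip() if len(parts) > 2 else ""
--     return name, value
-- ===== SOURCE B (Python) =====
-- def split_options(block_lines: list[str]) -> tuple[dict[str, object], list[str]]:
--     options: dict[str, object] = {}
--     split = len(block_lines)
--     for i, line in enumerate(block_lines):
--         if not (line.startswith(":") and ":" in line[1:]):
--             split = i
--             break
--         parts = line.split(":", 2)
--         options[parts[1].strip()] = parts[2].strip()
--     content = block_lines[split:]
--     if content and content[0].strip() == "":
--         content = content[1:]
--     return options, content
-- ===== Notes on version B (the rewrite author's own statement) =====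
-- stated objective: simpler
-- what changed: Replaced A's stateful in_options-flag accumulator loop (appending content line by line) with a boundary-find-then-slice decomposition: parse only the leading option lines, take the tail as content in one slice, and drop a single leading blank terminator line.
import Mathlib
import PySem

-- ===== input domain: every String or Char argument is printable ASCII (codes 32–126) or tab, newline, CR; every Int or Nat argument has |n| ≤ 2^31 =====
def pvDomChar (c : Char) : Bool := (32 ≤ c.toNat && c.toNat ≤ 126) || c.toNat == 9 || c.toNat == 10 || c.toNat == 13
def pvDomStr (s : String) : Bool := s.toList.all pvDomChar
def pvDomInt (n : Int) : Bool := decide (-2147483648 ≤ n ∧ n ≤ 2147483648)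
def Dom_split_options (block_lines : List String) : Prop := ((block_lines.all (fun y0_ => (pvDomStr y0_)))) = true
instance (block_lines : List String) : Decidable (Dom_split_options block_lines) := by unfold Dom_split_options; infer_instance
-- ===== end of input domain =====

-- B replaces A's stateful in_options flag loop by scanning only the leading option lines
-- and slicing the remaining tail in one shot (objective: simpler decomposition).

-- ===== PORT A =====
def parse_option_line (line : String) : String × String :=
  let parts := (PySem.Str.splitMax? line ":" 2).getD []
  let name := if parts.length > 1 then PySem.Str.strip (parts.getD 1 "") else ""
  let value := if parts.length > 2 then PySem.Str.strip (parts.getD 2 "") else ""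
  (name, value)

def stepA (st : PySem.Dict String String × List String × Bool) (line : String) :
    PySem.Dict String String × List String × Bool :=
  if st.2.2 = true then
    if PySem.Str.strip line = "" then (st.1, st.2.1, false)
    else if PySem.Str.startswith line ":" && PySem.Str.isIn ":" (PySem.Str.slice line (some 1) none) then
      (st.1.insert (parse_option_line line).1 (parse_option_line line).2, st.2.1, true)
    else (st.1, st.2.1 ++ [line], false)
  else (st.1, st.2.1 ++ [line], false)

def split_options (block_lines : List String) : (List (String × String)) × List String :=
  let st := block_lines.foldl stepA (PySem.Dict.empty, [], true)
  (st.1.items, st.2.1)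

-- ===== PORT B =====
-- the for-loop of Source B: consume the leading option lines into the dict,
-- return the dict and the tail block_lines[split:]
def altGo (lines : List String) (options : PySem.Dict String String) :
    PySem.Dict String String × List String :=
  match lines with
  | [] => (options, [])
  | line :: rest =>
    if PySem.Str.startswith line ":" && PySem.Str.isIn ":" (PySem.Str.slice line (some 1) none) then
      let parts := (PySem.Str.splitMax? line ":" 2).getD []
      altGo rest (options.insert (PySem.Str.strip (parts.getD 1 "")) (PySem.Str.strip (parts.getD 2 "")))
    else (options, line :: rest)

-- Source B's "if content and content[0].strip() == '': content = content[1:]"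
def dropLeadBlank (content : List String) : List String :=
  match content with
  | [] => []
  | c :: rest => if PySem.Str.strip c = "" then rest else c :: rest

def split_options_alt (block_lines : List String) : (List (String × String)) × List String :=
  let r := altGo block_lines PySem.Dict.empty
  (r.1.items, dropLeadBlank r.2)

-- ===== PRECONDITION & SPEC =====
def Spec_split_options (block_lines : List String) (out : (List (String × String)) × List String) : Prop := out = split_options_alt block_lines
instance (block_lines : List String) (out : (List (String × String)) × List String) : Decidable (Spec_split_options block_lines out) := by unfold Spec_split_options; infer_instance

-- ===== CLAIM (what is proved, stated in full; the proofs are below) =====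
def Claim_equal_split_options : Prop := ∀ (block_lines : List String), Dom_split_options block_lines → Spec_split_options block_lines (split_options block_lines)

-- ===== LEMMAS AND PROOFS =====

-- a line starting with ':' is not whitespace-only, so A's blank check never fires on an option line
lemma strip_ne_empty_of_startswith_colon (s : String)
    (h : PySem.Str.startswith s ":" = true) : PySem.Str.strip s ≠ "" := by
  intro he
  have hp : (":".toList) <+: s.toList := by
    simpa [PySem.Chars.startswith_iff] using h
  obtain ⟨t, ht⟩ := hp
  have hl : s.toList = ':' :: t := by simpa using ht.symm
  have h2 : PySem.Chars.strip s.toList = ([] : List Char) := by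
    have := congrArg String.toList he
    simpa using this
  rw [hl] at h2
  simp only [PySem.Chars.strip, PySem.Chars.lstrip, PySem.Chars.rstrip] at h2
  have hns : PySem.Chars.isspace ':' = false := by decide
  rw [List.dropWhile_cons_of_neg (by simp [hns])] at h2
  have h3 : List.dropWhile PySem.Chars.isspace ((':' :: t).reverse) = [] :=
    List.reverse_eq_nil_iff.mp h2
  have := List.dropWhile_eq_nil_iff.mp h3 ':' (by simp)
  simp [hns] at this

-- A's parse_option_line equals B's direct parts[1]/parts[2] extraction
lemma parse_eq (line : String) :
    parse_option_line line =
      (PySem.Str.strip (((PySem.Str.splitMax? line ":" 2).getD []).getD 1 ""),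
       PySem.Str.strip (((PySem.Str.splitMax? line ":" 2).getD []).getD 2 "")) := by
  have hstrip : PySem.Str.strip "" = "" := by decide
  unfold parse_option_line
  set parts := (PySem.Str.splitMax? line ":" 2).getD [] with hparts
  dsimp only
  split_ifs with h1 h2 h2 <;>
    simp_all [le_of_not_gt]

-- once in_options is false, A just appends every remaining line
lemma foldA_false (lines : List String) : ∀ (d : PySem.Dict String String) (c : List String),
    List.foldl stepA (d, c, false) lines = (d, c ++ lines, false) := by
  induction lines with
  | nil => simp
  | cons line rest ih =>
    intro d c
    simp [stepA, ih d (c ++ [line])]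

-- the loop invariant: A's fold from a pristine in_options state is B's boundary scan
lemma fold_eq_go (lines : List String) : ∀ (d : PySem.Dict String String),
    List.foldl stepA (d, [], true) lines =
      ((altGo lines d).1, dropLeadBlank (altGo lines d).2, (altGo lines d).2.isEmpty) := by
  induction lines with
  | nil => intro d; simp [altGo, dropLeadBlank]
  | cons line rest ih =>
    intro d
    by_cases hopt : (PySem.Str.startswith line ":" && PySem.Str.isIn ":" (PySem.Str.slice line (some 1) none)) = true
    · have hsw : PySem.Str.startswith line ":" = true := (Bool.and_eq_true _ _).mp hopt |>.1
      have hne := strip_ne_empty_of_startswith_colon line hsw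
      simp only [List.foldl_cons, stepA, if_neg hne, if_pos hopt, altGo, parse_eq]
      exact ih _
    · have hopt' : ¬(PySem.Chars.startswith line.toList [':'] = true ∧
          PySem.Chars.isIn [':'] (PySem.List.slice line.toList (some 1) none) = true) := by
        simpa using hopt
      by_cases hb : PySem.Str.strip line = ""
      · simp [stepA, hb, altGo, hopt', dropLeadBlank, foldA_false]
      · simp [stepA, hb, altGo, hopt', dropLeadBlank, foldA_false]

-- ===== VERDICT (by name: the statement is the Claim_ definition above) =====
theorem split_options_spec : Claim_equal_split_options := by
  intro block_lines _
  show split_options block_lines = split_options_alt block_lines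
  simp [split_options, split_options_alt, fold_eq_go]
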